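-- pv_equiv track=rewrite | github.com/kobinpy/kobin | kobin/routes.py | match_path
-- ===== SOURCE A (Python) =====
-- def split_by_slash(path):
--     stripped_path = path.lstrip('/').rstrip('/')
--     return stripped_path.split('/')
--
-- def match_path(rule, path):
--     """ Match path.
--
--     >>> match_path('/foo', '/foo')
--     True, {}
--     >>> match_path('/foo', '/bar')
--     False, {}
--     >>> match_path('/users/{user_id}', '/users/1')
--     True, {'user_id', 1}
--     >>> match_path('/users/{user_id}', '/users/not-integer')
--     True, {'user_id': 'not-integer'}
--     """
--     split_rule = split_by_slash(rule)
--     split_path = split_by_slash(path)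
--     url_vars = {}
--
--     if len(split_rule) != len(split_path):
--         return False, {}
--
--     for r, p in zip(split_rule, split_path):
--         if r.startswith('{') and r.endswith('}'):
--             url_vars[r[1:-1]] = p
--             continue
--         if r != p:
--             return False, {}
--     return True, url_vars
-- ===== SOURCE B (Python) =====
-- def match_path(rule, path):
--     """Single synchronized scan over both stripped strings: segments are
--     consumed in lockstep without pre-splitting, zipping or a length check
--     (a length mismatch surfaces as one side ending early)."""
--     r = rule.lstrip('/').rstrip('/')
--     p = path.lstrip('/').rstrip('/')
--     url_vars = {}
--     i = j = 0
--     while True: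
--         k = r.find('/', i)
--         if k == -1:
--             k = len(r)
--         l = p.find('/', j)
--         if l == -1:
--             l = len(p)
--         rseg, pseg = r[i:k], p[j:l]
--         if rseg[:1] == '{' and rseg[-1:] == '}':
--             url_vars[rseg[1:-1]] = pseg
--         elif rseg != pseg:
--             return False, {}
--         r_more, p_more = k < len(r), l < len(p)
--         if r_more != p_more:
--             return False, {}
--         if not r_more:
--             return True, url_vars
--         i, j = k + 1, l + 1
-- ===== Notes on version B (the rewrite author's own statement) =====
-- stated objective: alternative
-- what changed: A pre-splits both strings into segment lists, checks their lengths and loops over zip with early returns; B never splits: it walks both stripped strings in one synchronized character scan, consuming one segment from each per step, with a length mismatch detected when one side runs out of slashes.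
import Mathlib
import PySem

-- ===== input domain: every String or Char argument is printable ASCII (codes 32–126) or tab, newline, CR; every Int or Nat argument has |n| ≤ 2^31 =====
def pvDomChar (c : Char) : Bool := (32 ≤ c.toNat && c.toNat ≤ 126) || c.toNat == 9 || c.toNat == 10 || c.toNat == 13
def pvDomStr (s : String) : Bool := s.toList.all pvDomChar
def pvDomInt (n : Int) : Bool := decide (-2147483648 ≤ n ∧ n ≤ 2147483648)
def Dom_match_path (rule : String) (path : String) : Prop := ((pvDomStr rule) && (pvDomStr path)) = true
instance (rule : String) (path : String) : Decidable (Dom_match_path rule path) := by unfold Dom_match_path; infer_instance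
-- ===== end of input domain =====

-- B replaces A's split-into-lists + length check + zip loop by a single synchronized
-- character scan of both stripped strings, consuming one segment from each per step
-- (objective: alternative; same cost).

-- ===== PORT A =====
-- module helper: path.lstrip('/').rstrip('/').split('/')
-- lstrip('/')/rstrip('/') ported by hand as dropWhile on each end (exact: the strip set is the single char '/');
-- split('/') is PySem.Chars.splitOn with the one-char separator.
def split_by_slash (s : String) : List String :=
  let stripped := (((s.toList.dropWhile (· == '/')).reverse.dropWhile (· == '/')).reverse)
  (PySem.Chars.splitOn stripped ['/']).map String.ofList

-- r.startswith('{') and r.endswith('}')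
def pvIsVar (r : String) : Bool :=
  PySem.Str.startswith r "{" && PySem.Str.endswith r "}"

-- A's for-loop over zip(split_rule, split_path) with the mutable dict url_vars and early return
def matchLoopA : List (String × String) → PySem.Dict String String → Bool × (List (String × String))
  | [], d => (true, d.items)
  | (r, p) :: rest, d =>
    if pvIsVar r then
      matchLoopA rest (d.insert (PySem.Str.slice r (some 1) (some (-1))) p)
    else if r ≠ p then (false, [])
    else matchLoopA rest d

def match_path (rule : String) (path : String) : Bool × (List (String × String)) :=
  let split_rule := split_by_slash rule
  let split_path := split_by_slash path
  if split_rule.length ≠ split_path.length then (false, [])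
  else matchLoopA (split_rule.zip split_path) (PySem.Dict.mk [])

-- ===== PORT B =====
-- B's strip of leading/trailing '/' (same hand port of lstrip/rstrip)
def stripSlashes (cs : List Char) : List Char :=
  ((cs.dropWhile (· == '/')).reverse.dropWhile (· == '/')).reverse

-- B's while-loop: the scan to the next '/' (r.find('/', i), up to the end when absent)
-- delimits the current segment — ported as takeWhile/dropWhile of (· != '/'); each
-- iteration consumes one segment from each side and recurses past the separators.
def matchChars (rcs pcs : List Char) (d : PySem.Dict String String) :
    Bool × (List (String × String)) :=
  let rseg := rcs.takeWhile (· != '/')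
  let rrest := rcs.dropWhile (· != '/')
  let pseg := pcs.takeWhile (· != '/')
  let prest := pcs.dropWhile (· != '/')
  -- rseg[:1] == '{' and rseg[-1:] == '}' ; rseg[1:-1] ; rseg != pseg
  let step : Option (PySem.Dict String String) :=
    if rseg.head? == some '{' && rseg.getLast? == some '}' then
      some (d.insert (String.ofList (PySem.List.slice rseg (some 1) (some (-1))))
        (String.ofList pseg))
    else if rseg == pseg then some d
    else none
  match step with
  | none => (false, [])
  | some d' =>
    match hr : rrest, prest with
    | [], [] => (true, d'.items)
    | _ :: rt, _ :: pt => matchChars rt pt d'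
    | _, _ => (false, [])
termination_by rcs.length
decreasing_by
  have h1 : rrest.length ≤ rcs.length := List.length_dropWhile_le _ _
  rw [hr] at h1
  simp at h1
  omega

def match_path_alt (rule : String) (path : String) : Bool × (List (String × String)) :=
  matchChars (stripSlashes rule.toList) (stripSlashes path.toList) (PySem.Dict.mk [])

-- ===== PRECONDITION & SPEC =====
def Spec_match_path (rule : String) (path : String) (out : Bool × (List (String × String))) : Prop := out = match_path_alt rule path
instance (rule : String) (path : String) (out : Bool × (List (String × String))) : Decidable (Spec_match_path rule path out) := by unfold Spec_match_path; infer_instance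

-- ===== CLAIM =====
def Claim_equal_match_path : Prop := ∀ (rule : String) (path : String), Dom_match_path rule path → Spec_match_path rule path (match_path rule path)

-- ===== LEMMAS AND PROOFS =====

-- structural form of split-on-'/'
def splitSlash : List Char → List (List Char)
  | [] => [[]]
  | c :: t =>
    if c = '/' then [] :: splitSlash t
    else
      match splitSlash t with
      | [] => [[c]]
      | s :: ss => (c :: s) :: ss

theorem splitSlash_ne_nil (cs : List Char) : splitSlash cs ≠ [] := by
  induction cs with
  | nil => simp [splitSlash]
  | cons c t ih =>
    simp only [splitSlash]
    split_ifs
    · simp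
    · cases h : splitSlash t <;> simp

-- unfolding equations of the fueled go of Chars.splitOn at the one-char separator '/'
theorem splitOn_go_nil (f : Nat) (cur : List Char) (accs : List (List Char)) :
    PySem.Chars.splitOn.go ['/'] (f+1) [] cur accs = (cur.reverse :: accs).reverse := by
  simp [PySem.Chars.splitOn.go]

theorem splitOn_go_cons (f : Nat) (c : Char) (rest cur : List Char) (accs : List (List Char)) :
    PySem.Chars.splitOn.go ['/'] (f+1) (c :: rest) cur accs =
      if c = '/' then PySem.Chars.splitOn.go ['/'] f rest [] (cur.reverse :: accs)
      else PySem.Chars.splitOn.go ['/'] f rest (c :: cur) accs := by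
  rw [PySem.Chars.splitOn.go]
  simp only [List.isPrefixOf, Bool.and_true]
  by_cases h : c = '/'
  · simp [h]
  · simp [h, Ne.symm h]

-- the fueled go, characterized by splitSlash
theorem splitOn_go_spec (fuel : Nat) :
    ∀ (l cur : List Char) (accs : List (List Char)), l.length < fuel →
      PySem.Chars.splitOn.go ['/'] fuel l cur accs =
        accs.reverse ++
          (match splitSlash l with
           | [] => []
           | s :: ss => (cur.reverse ++ s) :: ss) := by
  induction fuel with
  | zero => intro l cur accs h; omega
  | succ f ih =>
    intro l cur accs h
    cases l with
    | nil => simp [splitOn_go_nil, splitSlash]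
    | cons c rest =>
      rw [splitOn_go_cons]
      have hlen : rest.length < f := by simpa using h
      cases hs : splitSlash rest with
      | nil => exact absurd hs (splitSlash_ne_nil rest)
      | cons s ss =>
        by_cases hc : c = '/'
        · rw [if_pos hc, ih rest [] _ hlen, hs]
          simp [splitSlash, hc, hs]
        · rw [if_neg hc, ih rest (c :: cur) _ hlen, hs]
          simp [splitSlash, hc, hs]

theorem splitOn_eq_splitSlash (cs : List Char) :
    PySem.Chars.splitOn cs ['/'] = splitSlash cs := by
  show PySem.Chars.splitOn.go ['/'] (cs.length + 1) cs [] [] = splitSlash cs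
  rw [splitOn_go_spec (cs.length + 1) cs [] [] (by omega)]
  cases hs : splitSlash cs with
  | nil => exact absurd hs (splitSlash_ne_nil cs)
  | cons s ss => simp

-- head/tail view of splitSlash
theorem splitSlash_eq_takeWhile (cs : List Char) :
    splitSlash cs =
      cs.takeWhile (· != '/') ::
        (match cs.dropWhile (· != '/') with
         | [] => []
         | _ :: t => splitSlash t) := by
  induction cs with
  | nil => simp [splitSlash]
  | cons c t ih =>
    by_cases hc : c = '/'
    · simp [splitSlash, hc]
    · rw [splitSlash, if_neg hc, ih]
      simp [hc]

-- A-style loop on the two segment lists (the recursion shape shared with B)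
def matchSegs : List String → List String → PySem.Dict String String → Bool × (List (String × String))
  | [], [], d => (true, d.items)
  | r :: rs, p :: ps, d =>
    if pvIsVar r then matchSegs rs ps (d.insert (PySem.Str.slice r (some 1) (some (-1))) p)
    else if r = p then matchSegs rs ps d
    else (false, [])
  | _, _, _ => (false, [])

theorem matchLoopA_eq_matchSegs (rs ps : List String) (d : PySem.Dict String String)
    (h : rs.length = ps.length) : matchLoopA (rs.zip ps) d = matchSegs rs ps d := by
  induction rs generalizing ps d with
  | nil => cases ps with
    | nil => rfl
    | cons p ps => simp at h
  | cons r rs ih =>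
    cases ps with
    | nil => simp at h
    | cons p ps =>
      have h' : rs.length = ps.length := by simpa using h
      simp only [List.zip_cons_cons, matchLoopA, matchSegs, ne_eq, ite_not]
      split_ifs with h1 h2 <;> first | rfl | exact ih _ _ h'

theorem matchSegs_ne_length (rs ps : List String) (d : PySem.Dict String String)
    (h : rs.length ≠ ps.length) : matchSegs rs ps d = (false, []) := by
  induction rs generalizing ps d with
  | nil => cases ps with
    | nil => simp at h
    | cons p ps => rfl
  | cons r rs ih =>
    cases ps with
    | nil => rfl
    | cons p ps =>
      have h' : rs.length ≠ ps.length := by simpa using h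
      simp only [matchSegs]
      split_ifs <;> first | exact ih _ _ h' | rfl

theorem startswith_ofList (cs : List Char) :
    PySem.Str.startswith (String.ofList cs) "{" = (cs.head? == some '{') := by
  have : PySem.Chars.startswith cs ['{'] = (cs.head? == some '{') := by
    cases cs <;> simp [PySem.Chars.startswith, List.isPrefixOf, eq_comm]
  simpa [pysem] using this

theorem endswith_ofList (cs : List Char) :
    PySem.Str.endswith (String.ofList cs) "}" = (cs.getLast? == some '}') := by
  have : PySem.Chars.endswith cs ['}'] = (cs.getLast? == some '}') := by
    induction cs using List.reverseRecOn with
    | nil => rfl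
    | append_singleton init c ih =>
      rw [Bool.eq_iff_iff, PySem.Chars.endswith_iff]
      simp only [List.getLast?_concat, beq_iff_eq, Option.some.injEq]
      constructor
      · rintro ⟨t, ht⟩
        have := congrArg List.getLast? ht
        simpa [List.getLast?_concat] using this.symm
      · rintro rfl; exact ⟨init, rfl⟩
  simpa [pysem] using this

theorem pvIsVar_ofList (cs : List Char) :
    pvIsVar (String.ofList cs) = (cs.head? == some '{' && cs.getLast? == some '}') := by
  rw [pvIsVar, startswith_ofList, endswith_ofList]

theorem slice_ofList (cs : List Char) :
    PySem.Str.slice (String.ofList cs) (some 1) (some (-1)) =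
      String.ofList (PySem.List.slice cs (some 1) (some (-1))) := by
  simp [PySem.Str.slice, pysem]

theorem matchChars_eq_matchSegs_aux (n : Nat) :
    ∀ (rcs pcs : List Char) (d : PySem.Dict String String), rcs.length < n →
      matchChars rcs pcs d =
        matchSegs ((splitSlash rcs).map String.ofList) ((splitSlash pcs).map String.ofList) d := by
  induction n with
  | zero => intro rcs pcs d h; omega
  | succ n ih =>
    intro rcs pcs d h
    rw [matchChars, splitSlash_eq_takeWhile rcs, splitSlash_eq_takeWhile pcs]
    simp only [List.map_cons, matchSegs, pvIsVar_ofList, slice_ofList]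
    have hlen := List.length_dropWhile_le (fun x => x != '/') rcs
    by_cases hv : ((List.takeWhile (fun x => x != '/') rcs).head? == some '{' &&
        (List.takeWhile (fun x => x != '/') rcs).getLast? == some '}') = true
    · simp only [hv, if_true]
      split
      · rename_i heq1 heq2
        simp [heq1, heq2, matchSegs]
      · rename_i a rt b pt heq1 heq2
        simp only [heq1, heq2]
        refine ih rt pt _ ?_
        have hl2 := congrArg List.length heq1
        simp at hl2
        omega
      · rename_i hni hnc
        rcases hrr : List.dropWhile (fun x => x != '/') rcs with _ | ⟨rc, rt⟩ <;>
          rcases hpp : List.dropWhile (fun x => x != '/') pcs with _ | ⟨pc, pt⟩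
        · exact absurd hpp (by simpa [hrr] using hni)
        · cases hs : splitSlash pt with
          | nil => exact absurd hs (splitSlash_ne_nil pt)
          | cons ss sss => simp [hrr, hpp, hs, matchSegs]
        · cases hs : splitSlash rt with
          | nil => exact absurd hs (splitSlash_ne_nil rt)
          | cons ss sss => simp [hrr, hpp, hs, matchSegs]
        · exact absurd hpp (by simpa [hrr] using hnc rc rt pc pt)
    · simp only [hv, Bool.false_eq_true, if_false]
      by_cases he : List.takeWhile (fun x => x != '/') rcs = List.takeWhile (fun x => x != '/') pcs
      · simp only [he, beq_self_eq_true, if_true]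
        split
        · rename_i heq1 heq2
          simp [heq1, heq2, matchSegs]
        · rename_i a rt b pt heq1 heq2
          simp only [heq1, heq2]
          refine ih rt pt _ ?_
          have hl2 := congrArg List.length heq1
          simp at hl2
          omega
        · rename_i hni hnc
          rcases hrr : List.dropWhile (fun x => x != '/') rcs with _ | ⟨rc, rt⟩ <;>
            rcases hpp : List.dropWhile (fun x => x != '/') pcs with _ | ⟨pc, pt⟩
          · exact absurd hpp (by simpa [hrr] using hni)
          · cases hs : splitSlash pt with
            | nil => exact absurd hs (splitSlash_ne_nil pt)
            | cons ss sss => simp [hrr, hpp, hs, matchSegs]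
          · cases hs : splitSlash rt with
            | nil => exact absurd hs (splitSlash_ne_nil rt)
            | cons ss sss => simp [hrr, hpp, hs, matchSegs]
          · exact absurd hpp (by simpa [hrr] using hnc rc rt pc pt)
      · simp only [beq_eq_false_iff_ne.mpr he, Bool.false_eq_true, if_false,
          if_neg (fun hc => he (String.ofList_inj.mp hc))]

theorem matchChars_eq_matchSegs (rcs pcs : List Char) (d : PySem.Dict String String) :
    matchChars rcs pcs d =
      matchSegs ((splitSlash rcs).map String.ofList) ((splitSlash pcs).map String.ofList) d :=
  matchChars_eq_matchSegs_aux (rcs.length + 1) rcs pcs d (by omega)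

-- ===== VERDICT =====
theorem match_path_spec : Claim_equal_match_path := by
  intro rule path _
  unfold Spec_match_path match_path match_path_alt split_by_slash stripSlashes
  dsimp only
  rw [splitOn_eq_splitSlash, splitOn_eq_splitSlash, matchChars_eq_matchSegs]
  split_ifs with h
  · exact (matchSegs_ne_length _ _ _ h).symm
  · exact matchLoopA_eq_matchSegs _ _ _ (not_ne_iff.mp h)
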